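-- pv_equiv track=rewrite | github.com/ferc255/SummerPractice | compress.py | get_dict_str
-- ===== SOURCE A (Python) =====
-- def get_dict_str(table, column):
--     lot = {}
--     freq = {}
--     for i, row in enumerate(table):
--         val = row[column]
--         if not(val in lot):
--             lot[val] = {}
--         if not(row[-1] in lot[val]):
--             lot[val][row[-1]] = 0
--         lot[val][row[-1]] += 1
--
--         if not(val in freq):
--             freq[val] = []
--         freq[val].append(i)
--
--     return lot, freq
-- ===== SOURCE B (Python) =====
-- def get_dict_str(table, column):
--     # Pass 1: only the index lists.
--     freq = {}
--     for i, row in enumerate(table):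
--         freq.setdefault(row[column], []).append(i)
--     # Pass 2: derive the per-value label counts from the index lists.
--     lot = {}
--     for val, idxs in freq.items():
--         counts = {}
--         for i in idxs:
--             lbl = table[i][-1]
--             counts[lbl] = counts.get(lbl, 0) + 1
--         lot[val] = counts
--     return lot, freq
-- ===== Notes on version B (the rewrite author's own statement) =====
-- stated objective: alternative
-- what changed: A builds lot and freq together in one fused pass; B builds only the index lists freq in pass one and then derives each per-value label-count dict from its index list in a second phase, so the two structures are no longer maintained in lockstep.
import Mathlib
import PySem

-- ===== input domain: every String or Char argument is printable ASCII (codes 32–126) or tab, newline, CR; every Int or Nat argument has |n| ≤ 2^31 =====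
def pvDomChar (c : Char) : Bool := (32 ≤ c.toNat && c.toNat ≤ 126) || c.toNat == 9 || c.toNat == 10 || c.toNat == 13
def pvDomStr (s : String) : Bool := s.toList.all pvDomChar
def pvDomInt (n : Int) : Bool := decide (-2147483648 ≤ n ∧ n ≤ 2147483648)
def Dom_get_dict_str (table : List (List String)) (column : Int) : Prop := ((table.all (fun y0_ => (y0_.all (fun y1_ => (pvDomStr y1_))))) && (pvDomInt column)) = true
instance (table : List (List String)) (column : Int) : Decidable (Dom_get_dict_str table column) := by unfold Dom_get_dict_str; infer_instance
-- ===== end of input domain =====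

-- B replaces A's fused single pass (updating lot and freq together) by building freq alone
-- first and deriving each per-value label-count dict from its index list in a second phase
-- (objective: alternative decomposition, same cost).

-- ===== PORT A =====
def get_dict_str (table : List (List String)) (column : Int) :
    (List (String × List (String × Int))) × (List (String × List Int)) :=
  let st := (PySem.List.enumerate table 0).foldl
    (fun (st : PySem.Dict String (PySem.Dict String Int) × PySem.Dict String (List Int)) p =>
      let lot := st.1
      let freq := st.2
      let val := PySem.List.pyGetD p.2 column ""
      let lot := if lot.contains val then lot else lot.insert val PySem.Dict.empty
      let lbl := PySem.List.pyGetD p.2 (-1) ""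
      let inner := lot.getD val PySem.Dict.empty
      let inner := if inner.contains lbl then inner else inner.insert lbl 0
      let lot := lot.insert val (inner.insert lbl (inner.getD lbl 0 + 1))
      let freq := if freq.contains val then freq else freq.insert val []
      let freq := freq.insert val (freq.getD val [] ++ [p.1])
      (lot, freq))
    (PySem.Dict.empty, PySem.Dict.empty)
  (st.1.items.map (fun q => (q.1, q.2.items)), st.2.items)

-- ===== PORT B =====
def get_dict_str_alt (table : List (List String)) (column : Int) :
    (List (String × List (String × Int))) × (List (String × List Int)) :=
  let freq := (PySem.List.enumerate table 0).foldl
    (fun (f : PySem.Dict String (List Int)) p =>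
      let val := PySem.List.pyGetD p.2 column ""
      f.insert val (f.getD val [] ++ [p.1]))
    PySem.Dict.empty
  let lot := freq.items.foldl
    (fun (l : PySem.Dict String (PySem.Dict String Int)) q =>
      l.insert q.1 (q.2.foldl
        (fun (d : PySem.Dict String Int) i =>
          let lbl := PySem.List.pyGetD (PySem.List.pyGetD table i []) (-1) ""
          d.insert lbl (d.getD lbl 0 + 1))
        PySem.Dict.empty))
    PySem.Dict.empty
  (lot.items.map (fun q => (q.1, q.2.items)), freq.items)

-- ===== PRECONDITION & SPEC =====
-- A raises IndexError when some row lacks index `column` or is empty (row[-1]); exactly those inputs are excluded.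
def Pre_get_dict_str (table : List (List String)) (column : Int) : Prop :=
  ∀ row ∈ table, PySem.Raise.InRange row.length column ∧ row ≠ []
instance (table : List (List String)) (column : Int) : Decidable (Pre_get_dict_str table column) := by
  unfold Pre_get_dict_str; infer_instance

def pvWitness_get_dict_str : List (List String) × Int := ([["a", "x"], ["b", "y"], ["a", "x"]], 0)

def Spec_get_dict_str (table : List (List String)) (column : Int)
    (out : (List (String × List (String × Int))) × (List (String × List Int))) : Prop :=
  out = get_dict_str_alt table column
instance (table : List (List String)) (column : Int)
    (out : (List (String × List (String × Int))) × (List (String × List Int))) :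
    Decidable (Spec_get_dict_str table column out) := by unfold Spec_get_dict_str; infer_instance

-- ===== CLAIM (what is proved, stated in full; the proofs are below) =====
def Claim_equal_get_dict_str : Prop := ∀ (table : List (List String)) (column : Int),
  Dom_get_dict_str table column → Pre_get_dict_str table column →
  Spec_get_dict_str table column (get_dict_str table column)

-- ===== LEMMAS AND PROOFS =====

-- proof-side names for the step functions of the two ports
def pvStepA (column : Int)
    (st : PySem.Dict String (PySem.Dict String Int) × PySem.Dict String (List Int))
    (p : Int × List String) :
    PySem.Dict String (PySem.Dict String Int) × PySem.Dict String (List Int) :=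
  let lot := st.1
  let freq := st.2
  let val := PySem.List.pyGetD p.2 column ""
  let lot := if lot.contains val then lot else lot.insert val PySem.Dict.empty
  let lbl := PySem.List.pyGetD p.2 (-1) ""
  let inner := lot.getD val PySem.Dict.empty
  let inner := if inner.contains lbl then inner else inner.insert lbl 0
  let lot := lot.insert val (inner.insert lbl (inner.getD lbl 0 + 1))
  let freq := if freq.contains val then freq else freq.insert val []
  let freq := freq.insert val (freq.getD val [] ++ [p.1])
  (lot, freq)

def pvStepF (column : Int) (f : PySem.Dict String (List Int)) (p : Int × List String) :
    PySem.Dict String (List Int) :=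
  let val := PySem.List.pyGetD p.2 column ""
  f.insert val (f.getD val [] ++ [p.1])

def pvCnt (table : List (List String)) (d : PySem.Dict String Int) (i : Int) :
    PySem.Dict String Int :=
  let lbl := PySem.List.pyGetD (PySem.List.pyGetD table i []) (-1) ""
  d.insert lbl (d.getD lbl 0 + 1)

def pvCount (table : List (List String)) (idxs : List Int) : PySem.Dict String Int :=
  idxs.foldl (pvCnt table) PySem.Dict.empty

def pvG (table : List (List String)) (q : String × List Int) : String × PySem.Dict String Int :=
  (q.1, pvCount table q.2)

lemma pvA_eq (table : List (List String)) (column : Int) :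
    get_dict_str table column =
      (let st := (PySem.List.enumerate table 0).foldl (pvStepA column)
          (PySem.Dict.empty, PySem.Dict.empty)
       (st.1.items.map (fun q => (q.1, q.2.items)), st.2.items)) := rfl

lemma pvB_eq (table : List (List String)) (column : Int) :
    get_dict_str_alt table column =
      (let freq := (PySem.List.enumerate table 0).foldl (pvStepF column) PySem.Dict.empty
       let lot := freq.items.foldl
          (fun l q => l.insert q.1 (pvCount table q.2)) PySem.Dict.empty
       (lot.items.map (fun q => (q.1, q.2.items)), freq.items)) := rfl

theorem pvStepA_snd (column : Int)
    (st : PySem.Dict String (PySem.Dict String Int) × PySem.Dict String (List Int))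
    (p : Int × List String) : (pvStepA column st p).2 = pvStepF column st.2 p := by
  unfold pvStepA pvStepF
  by_cases h : st.2.contains (PySem.List.pyGetD p.2 column "") = true
  · simp [h]
  · simp only [Bool.not_eq_true] at h
    simp [h, PySem.Dict.getD_insert_self, PySem.Dict.insert_insert_self,
      PySem.Dict.getD_of_not_contains]

theorem pvFoldA_snd (column : Int) (l : List (Int × List String))
    (st : PySem.Dict String (PySem.Dict String Int) × PySem.Dict String (List Int)) :
    (l.foldl (pvStepA column) st).2 = l.foldl (pvStepF column) st.2 := by
  induction l generalizing st with
  | nil => rfl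
  | cons p l ih => simp [List.foldl_cons, ih, pvStepA_snd]

theorem pvKeys_of_inv (table : List (List String))
    (lot : PySem.Dict String (PySem.Dict String Int)) (freq : PySem.Dict String (List Int))
    (h : lot.items = freq.items.map (pvG table)) : lot.keys = freq.keys := by
  simp only [PySem.Dict.keys, h, List.map_map]
  rfl

theorem pvIncr (inner : PySem.Dict String Int) (lbl : String) :
    (if inner.contains lbl then inner else inner.insert lbl 0).insert lbl
      ((if inner.contains lbl then inner else inner.insert lbl 0).getD lbl 0 + 1) =
    inner.insert lbl (inner.getD lbl 0 + 1) := by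
  by_cases h : inner.contains lbl = true
  · simp [h]
  · simp only [Bool.not_eq_true] at h
    simp [h, PySem.Dict.getD_insert_self, PySem.Dict.insert_insert_self,
      PySem.Dict.getD_of_not_contains]

theorem pvStepA_new (table : List (List String)) (column : Int)
    (lot : PySem.Dict String (PySem.Dict String Int)) (freq : PySem.Dict String (List Int))
    (p : Int × List String)
    (hp : PySem.List.pyGetD table p.1 [] = p.2)
    (hcf : freq.contains (PySem.List.pyGetD p.2 column "") = false)
    (hcl : lot.contains (PySem.List.pyGetD p.2 column "") = false) :
    pvStepA column (lot, freq) p =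
      (lot.insert (PySem.List.pyGetD p.2 column "") (pvCount table [p.1]),
       freq.insert (PySem.List.pyGetD p.2 column "") [p.1]) := by
  unfold pvStepA pvCount pvCnt
  simp [hcf, hcl, hp, PySem.Dict.getD_insert_self, PySem.Dict.insert_insert_self,
    PySem.Dict.getD_of_not_contains, PySem.Dict.contains_empty]

theorem pvStepA_old (table : List (List String)) (column : Int)
    (lot : PySem.Dict String (PySem.Dict String Int)) (freq : PySem.Dict String (List Int))
    (p : Int × List String) (idxs : List Int)
    (hp : PySem.List.pyGetD table p.1 [] = p.2)
    (hg : freq.get? (PySem.List.pyGetD p.2 column "") = some idxs)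
    (hcf : freq.contains (PySem.List.pyGetD p.2 column "") = true)
    (hcl : lot.contains (PySem.List.pyGetD p.2 column "") = true)
    (hlotget : lot.get? (PySem.List.pyGetD p.2 column "") = some (pvCount table idxs)) :
    pvStepA column (lot, freq) p =
      (lot.insert (PySem.List.pyGetD p.2 column "") (pvCount table (idxs ++ [p.1])),
       freq.insert (PySem.List.pyGetD p.2 column "") (idxs ++ [p.1])) := by
  have hgd : lot.getD (PySem.List.pyGetD p.2 column "") PySem.Dict.empty = pvCount table idxs := by
    rw [PySem.Dict.getD_eq_get?_getD, hlotget]; rfl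
  have hfd : freq.getD (PySem.List.pyGetD p.2 column "") [] = idxs := by
    rw [PySem.Dict.getD_eq_get?_getD, hg]; rfl
  have hcountapp : pvCount table (idxs ++ [p.1]) =
      (pvCount table idxs).insert (PySem.List.pyGetD p.2 (-1) "")
        ((pvCount table idxs).getD (PySem.List.pyGetD p.2 (-1) "") 0 + 1) := by
    unfold pvCount
    rw [List.foldl_append]
    show pvCnt table _ _ = _
    unfold pvCnt
    rw [show PySem.List.pyGetD (PySem.List.pyGetD table p.1 []) (-1) "" =
          PySem.List.pyGetD p.2 (-1) "" from by rw [hp]]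
  unfold pvStepA
  simp only [hcf, hcl, if_true, hgd, hfd, pvIncr, hcountapp]

theorem pvInv (table : List (List String)) (column : Int) (l : List (Int × List String))
    (hmem : ∀ p ∈ l, PySem.List.pyGetD table p.1 [] = p.2)
    (lot : PySem.Dict String (PySem.Dict String Int)) (freq : PySem.Dict String (List Int))
    (hnd : freq.keys.Nodup)
    (hinv : lot.items = freq.items.map (pvG table)) :
    (l.foldl (pvStepA column) (lot, freq)).2.keys.Nodup ∧
    (l.foldl (pvStepA column) (lot, freq)).1.items =
      (l.foldl (pvStepA column) (lot, freq)).2.items.map (pvG table) := by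
  induction l generalizing lot freq with
  | nil => exact ⟨hnd, hinv⟩
  | cons p l ih =>
    have hp := hmem p List.mem_cons_self
    have hkeys : lot.keys = freq.keys := pvKeys_of_inv table lot freq hinv
    have hcc : lot.contains (PySem.List.pyGetD p.2 column "") =
        freq.contains (PySem.List.pyGetD p.2 column "") := by
      rw [PySem.Dict.contains_eq_decide_mem_keys, PySem.Dict.contains_eq_decide_mem_keys, hkeys]
    simp only [List.foldl_cons]
    by_cases hc : freq.contains (PySem.List.pyGetD p.2 column "") = true
    · -- existing key
      obtain ⟨idxs, hg⟩ : ∃ idxs, freq.get? (PySem.List.pyGetD p.2 column "") = some idxs := by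
        rcases ho : freq.get? (PySem.List.pyGetD p.2 column "") with _ | idxs
        · rw [PySem.Dict.get?_eq_none_iff_contains] at ho
          rw [hc] at ho; cases ho
        · exact ⟨idxs, rfl⟩
      have hmi : (PySem.List.pyGetD p.2 column "", idxs) ∈ freq.items := by
        apply PySem.Dict.mem_items_of_get?_eq_some
        exact hg
      have hlotnd : lot.keys.Nodup := by rw [hkeys]; exact hnd
      have h1 : (PySem.List.pyGetD p.2 column "", pvCount table idxs) ∈ lot.items := by
        rw [hinv]
        exact List.mem_map_of_mem hmi
      have hlotget : lot.get? (PySem.List.pyGetD p.2 column "") = some (pvCount table idxs) := by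
        apply PySem.Dict.get?_of_mem_items
        all_goals first | exact h1 | exact hlotnd
      rw [pvStepA_old table column lot freq p idxs hp hg hc (hcc.trans hc) hlotget]
      apply ih (fun q hq => hmem q (List.mem_cons_of_mem p hq))
      · exact PySem.Dict.nodup_keys_insert _ _ _ hnd
      · rw [PySem.Dict.items_insert, PySem.Dict.items_insert]
        simp only [hcc.trans hc, hc, if_true]
        rw [hinv, List.map_map, List.map_map]
        apply List.map_congr_left
        intro q hq
        by_cases he : q.1 == PySem.List.pyGetD p.2 column ""
        · simp [Function.comp, pvG, he]
        · simp [Function.comp, pvG, he]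
    · -- new key
      simp only [Bool.not_eq_true] at hc
      rw [pvStepA_new table column lot freq p hp hc (hcc.trans hc)]
      apply ih (fun q hq => hmem q (List.mem_cons_of_mem p hq))
      · exact PySem.Dict.nodup_keys_insert _ _ _ hnd
      · rw [PySem.Dict.items_insert, PySem.Dict.items_insert]
        simp only [hcc.trans hc, hc, if_false, Bool.false_eq_true]
        rw [hinv, List.map_append]
        rfl

-- ===== VERDICT (by name: the statement is the Claim_ definition above) =====
theorem get_dict_str_spec : Claim_equal_get_dict_str := by
  intro table column hdom hpre
  unfold Spec_get_dict_str
  rw [pvA_eq, pvB_eq]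
  simp only []
  have hmem : ∀ p ∈ PySem.List.enumerate table 0, PySem.List.pyGetD table p.1 [] = p.2 := by
    intro p hpmem
    rw [PySem.List.mem_enumerate_iff] at hpmem
    obtain ⟨k, hk, rfl⟩ := hpmem
    simp [PySem.List.pyGetD_natCast, List.getD_eq_getElem?_getD, hk]
  have hbase : (PySem.Dict.empty : PySem.Dict String (PySem.Dict String Int)).items =
      (PySem.Dict.empty : PySem.Dict String (List Int)).items.map (pvG table) := rfl
  obtain ⟨hnd, hinv⟩ := pvInv table column (PySem.List.enumerate table 0) hmem
    PySem.Dict.empty PySem.Dict.empty (by simp) hbase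
  have hsnd := pvFoldA_snd column (PySem.List.enumerate table 0)
    (PySem.Dict.empty, PySem.Dict.empty)
  have hfresh : (((PySem.List.enumerate table 0).foldl (pvStepF column)
      PySem.Dict.empty).items.foldl
        (fun (l : PySem.Dict String (PySem.Dict String Int)) q =>
          l.insert q.1 (pvCount table q.2)) PySem.Dict.empty).items =
      ((PySem.List.enumerate table 0).foldl (pvStepF column)
        PySem.Dict.empty).items.map (pvG table) := by
    rw [PySem.Dict.items_foldl_insert_fresh]
    · rfl
    · intro a _; exact PySem.Dict.contains_empty _
    · show (((PySem.List.enumerate table 0).foldl (pvStepF column)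
        PySem.Dict.empty).keys).Nodup
      rw [← hsnd]; exact hnd
  apply Prod.ext
  · show _ = _
    rw [hinv, hsnd, hfresh]
  · show _ = _
    rw [hsnd]
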